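-- pv_equiv track=rewrite | github.com/Kuhron/programming | Mapping/BoxCornerMapping.py | dpar_is_on_reversed_edge_from_perspective_of_point
-- ===== SOURCE A (Python) =====
-- def dpar_is_on_reversed_edge_from_perspective_of_point(dpar, reference_point_code):
--     # get peel of reference point, it should be normalized to C-D peel
--     orig = reference_point_code[0]
--     if orig not in ["C", "D"]:
--         raise ValueError(f"please normalize peel for point {reference_point_code} to C-D")
--
--     # e.g. from the perspective of the C-D peel, the K-A edge runs the wrong way
--     # you'd want it to run down (toward K) from A (so in the 3 direction from A)
--     # but instead it runs up (toward A) from K (so in the 1 direction from K)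
--     # similarly the L-B edge runs to the right, in the 3 direction from L
--     # but we want it to run to the left, in the 1 direction from B
--     # so we will code points on these *as if* they do this,
--     # for the purposes of box corner mapping to find dpars
--     # and then convert the result back to the correct notation
--
--     # don't treat K/L as being reversed, just the points on the edge itself
--     if len(dpar) == 1:
--         return False
--
--     tail = dpar[1:]
--     uses_ones = all(x in ["0", "1"] for x in tail)
--     uses_threes = all(x in ["0", "3"] for x in tail)
--     has_non_zero = any(x != "0" for x in tail)
--     is_on_k_a_edge = dpar[0] == "K" and uses_ones and has_non_zero
--     is_on_l_b_edge = dpar[0] == "L" and uses_threes and has_non_zero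
--     return is_on_k_a_edge or is_on_l_b_edge
-- ===== SOURCE B (Python) =====
-- def dpar_is_on_reversed_edge_from_perspective_of_point(dpar, reference_point_code):
--     if reference_point_code[0] not in ["C", "D"]:
--         raise ValueError(f"please normalize peel for point {reference_point_code} to C-D")
--     if len(dpar) <= 1:
--         return False
--     if dpar[0] == "K":
--         allowed = "1"
--     elif dpar[0] == "L":
--         allowed = "3"
--     else:
--         return False
--     seen = False
--     for x in dpar[1:]:
--         if x == allowed:
--             seen = True
--         elif x != "0":
--             return False
--     return seen
-- ===== Notes on version B (the rewrite author's own statement) =====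
-- stated objective: alternative
-- what changed: Replaces the three separate whole-tail scans (all/all/any) and the two edge booleans by one early-exit pass over the tail tracking a single 'seen allowed digit' flag, with the allowed digit ('1' for K, '3' for L) selected up front.
import Mathlib
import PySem

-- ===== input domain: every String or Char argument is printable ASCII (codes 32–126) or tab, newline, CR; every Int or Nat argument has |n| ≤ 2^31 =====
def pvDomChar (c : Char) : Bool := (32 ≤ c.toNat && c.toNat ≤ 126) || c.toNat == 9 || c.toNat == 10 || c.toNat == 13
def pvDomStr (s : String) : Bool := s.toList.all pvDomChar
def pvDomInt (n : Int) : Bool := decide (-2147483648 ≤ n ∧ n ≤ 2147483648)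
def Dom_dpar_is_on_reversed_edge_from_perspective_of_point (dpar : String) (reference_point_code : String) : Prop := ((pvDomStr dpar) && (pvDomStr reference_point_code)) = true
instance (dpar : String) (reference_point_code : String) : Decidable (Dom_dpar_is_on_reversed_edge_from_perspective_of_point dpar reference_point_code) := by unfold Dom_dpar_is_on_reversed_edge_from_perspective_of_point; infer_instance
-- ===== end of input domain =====

-- B replaces A's three whole-tail scans by one early-exit pass tracking a single flag (objective: alternative decomposition, same cost).

-- ===== PORT A =====
def dpar_is_on_reversed_edge_from_perspective_of_point (dpar : String) (reference_point_code : String) : Bool :=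
  match PySem.List.pyGet? reference_point_code.toList 0 with
  | none => false      -- IndexError on reference_point_code[0]; excluded by Pre_
  | some orig =>
    if !(orig == 'C' || orig == 'D') then false   -- raise ValueError; excluded by Pre_
    else if dpar.toList.length == 1 then false
    else
      match PySem.List.pyGet? dpar.toList 0 with
      | none => false  -- IndexError on dpar[0]; excluded by Pre_
      | some d0 =>
        let tail := PySem.List.slice dpar.toList (some 1) none
        let uses_ones := tail.all (fun x => x == '0' || x == '1')
        let uses_threes := tail.all (fun x => x == '0' || x == '3')
        let has_non_zero := tail.any (fun x => x != '0')
        let is_on_k_a_edge := d0 == 'K' && uses_ones && has_non_zero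
        let is_on_l_b_edge := d0 == 'L' && uses_threes && has_non_zero
        is_on_k_a_edge || is_on_l_b_edge

-- ===== PORT B =====
-- the for-loop of Source B: one pass, early exit on a forbidden digit, flag `seen`
def pvAltLoop (allowed : Char) (seen : Bool) : List Char → Bool
  | [] => seen
  | x :: xs =>
    if x == allowed then pvAltLoop allowed true xs
    else if x != '0' then false
    else pvAltLoop allowed seen xs

def dpar_is_on_reversed_edge_from_perspective_of_point_alt (dpar : String) (reference_point_code : String) : Bool :=
  match PySem.List.pyGet? reference_point_code.toList 0 with
  | none => false      -- IndexError; excluded by Pre_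
  | some orig =>
    if !(orig == 'C' || orig == 'D') then false   -- raise ValueError; excluded by Pre_
    else if dpar.toList.length ≤ 1 then false
    else
      match dpar.toList with
      | [] => false    -- unreachable (length > 1)
      | d0 :: tail =>
        if d0 == 'K' then pvAltLoop '1' false tail
        else if d0 == 'L' then pvAltLoop '3' false tail
        else false

-- ===== PRECONDITION & SPEC =====
-- Pre_ excludes exactly the inputs on which A raises: ValueError when reference_point_code
-- does not start with 'C' or 'D' (including empty), and IndexError at dpar[0] when dpar = "".
def Pre_dpar_is_on_reversed_edge_from_perspective_of_point (dpar : String) (reference_point_code : String) : Prop :=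
  (reference_point_code.toList.head? = some 'C' ∨ reference_point_code.toList.head? = some 'D') ∧ dpar.toList ≠ []
instance (dpar : String) (reference_point_code : String) : Decidable (Pre_dpar_is_on_reversed_edge_from_perspective_of_point dpar reference_point_code) := by unfold Pre_dpar_is_on_reversed_edge_from_perspective_of_point; infer_instance

def pvWitness_dpar_is_on_reversed_edge_from_perspective_of_point : String × String := ("K01", "C")

def Spec_dpar_is_on_reversed_edge_from_perspective_of_point (dpar : String) (reference_point_code : String) (out : Bool) : Prop := out = dpar_is_on_reversed_edge_from_perspective_of_point_alt dpar reference_point_code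
instance (dpar : String) (reference_point_code : String) (out : Bool) : Decidable (Spec_dpar_is_on_reversed_edge_from_perspective_of_point dpar reference_point_code out) := by unfold Spec_dpar_is_on_reversed_edge_from_perspective_of_point; infer_instance

-- ===== CLAIM (what is proved, stated in full; the proofs are below) =====
def Claim_equal_dpar_is_on_reversed_edge_from_perspective_of_point : Prop := ∀ (dpar : String) (reference_point_code : String), Dom_dpar_is_on_reversed_edge_from_perspective_of_point dpar reference_point_code → Pre_dpar_is_on_reversed_edge_from_perspective_of_point dpar reference_point_code → Spec_dpar_is_on_reversed_edge_from_perspective_of_point dpar reference_point_code (dpar_is_on_reversed_edge_from_perspective_of_point dpar reference_point_code)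

-- ===== LEMMAS AND PROOFS =====

-- the loop characterised: it accepts iff every char is '0' or `allowed`, and
-- (seen already, or some char differs from '0')
theorem pvAltLoop_eq (allowed : Char) (h0 : allowed ≠ '0') (l : List Char) :
    ∀ seen, pvAltLoop allowed seen l
      = (l.all (fun x => x == '0' || x == allowed) && (seen || l.any (fun x => x != '0'))) := by
  induction l with
  | nil => intro seen; simp [pvAltLoop]
  | cons x xs ih =>
    intro seen
    by_cases hx : x = allowed
    · subst hx
      simp [pvAltLoop, ih, h0, bne_iff_ne]
    · by_cases hz : x = '0'
      · subst hz
        simp [pvAltLoop, beq_iff_eq, hx, ih]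
      · simp [pvAltLoop, hx, hz, bne_iff_ne]

-- ===== VERDICT (by name: the statement is the Claim_ definition above) =====
theorem dpar_is_on_reversed_edge_from_perspective_of_point_spec : Claim_equal_dpar_is_on_reversed_edge_from_perspective_of_point := by
  intro dpar rpc _ hpre
  obtain ⟨horig, hne⟩ := hpre
  unfold Spec_dpar_is_on_reversed_edge_from_perspective_of_point
  unfold dpar_is_on_reversed_edge_from_perspective_of_point dpar_is_on_reversed_edge_from_perspective_of_point_alt
  cases hl : dpar.toList with
  | nil => exact absurd hl hne
  | cons d0 tail =>
    have hget : PySem.List.pyGet? rpc.toList 0 = rpc.toList.head? := by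
      cases rpc.toList <;> simp [PySem.List.pyGet?, PySem.List.pyIdx?]
    have hC : ∃ c, PySem.List.pyGet? rpc.toList 0 = some c ∧ (c = 'C' ∨ c = 'D') := by
      rcases horig with h | h
      · exact ⟨'C', by rw [hget, h], Or.inl rfl⟩
      · exact ⟨'D', by rw [hget, h], Or.inr rfl⟩
    obtain ⟨c, hc, hcd⟩ := hC
    have hcond : (!(c == 'C' || c == 'D')) = false := by
      rcases hcd with rfl | rfl <;> simp
    simp only [hc, hcond, Bool.false_eq_true, if_false]
    cases tail with
    | nil => simp
    | cons t ts =>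
      have hslice : PySem.List.slice (d0 :: t :: ts) (some 1) none = t :: ts := by
        simpa using PySem.List.slice_from_one (d0 :: t :: ts)
      have hlen1 : ((d0 :: t :: ts).length == 1) = false := by simp
      have hle1 : ¬ (d0 :: t :: ts).length ≤ 1 := by simp
      have hget0 : PySem.List.pyGet? (d0 :: t :: ts) 0 = some d0 := by
        rw [show ((0:Int)) = ((0:Nat):Int) from rfl, PySem.List.pyGet?_natCast]
        rfl
      simp only [hlen1, hle1, hget0, hslice, Bool.false_eq_true, if_false]
      by_cases hK : d0 = 'K'
      · subst hK
        rw [pvAltLoop_eq '1' (by decide) (t :: ts) false]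
        simp [Bool.and_assoc]
      · by_cases hL : d0 = 'L'
        · subst hL
          rw [pvAltLoop_eq '3' (by decide) (t :: ts) false]
          simp [Bool.and_assoc]
        · simp [hK, hL]
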